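-- pv_equiv track=rewrite | github.com/salehask/Accenture-Coding-Questions | 3rdcode.py | numberOfBalls
-- ===== SOURCE A (Python) =====
-- def numberOfBalls(arr,n):
--  if arr is None:
--    return-1
--  else:
--    sum=0
--    for i in range(0,n):
--      a_balls = (i+1)
--      diff=a_balls-arr[i]
--      sum+=diff
--  return sum
-- ===== SOURCE B (Python) =====
-- def numberOfBalls(arr, n):
--     if arr is None:
--         return -1
--     m = max(n, 0)
--     return m * (m + 1) // 2 - sum(arr[:m])
-- ===== Notes on version B (the rewrite author's own statement) =====
-- stated objective: simpler
-- what changed: Replaces the accumulating index loop with the closed-form triangular number m*(m+1)//2 minus the sum of a slice (m = max(n,0)).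
-- outside the precondition, e.g. on numberOfBalls([1, 2], 5): A raises IndexError, B returns 12
import Mathlib
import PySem

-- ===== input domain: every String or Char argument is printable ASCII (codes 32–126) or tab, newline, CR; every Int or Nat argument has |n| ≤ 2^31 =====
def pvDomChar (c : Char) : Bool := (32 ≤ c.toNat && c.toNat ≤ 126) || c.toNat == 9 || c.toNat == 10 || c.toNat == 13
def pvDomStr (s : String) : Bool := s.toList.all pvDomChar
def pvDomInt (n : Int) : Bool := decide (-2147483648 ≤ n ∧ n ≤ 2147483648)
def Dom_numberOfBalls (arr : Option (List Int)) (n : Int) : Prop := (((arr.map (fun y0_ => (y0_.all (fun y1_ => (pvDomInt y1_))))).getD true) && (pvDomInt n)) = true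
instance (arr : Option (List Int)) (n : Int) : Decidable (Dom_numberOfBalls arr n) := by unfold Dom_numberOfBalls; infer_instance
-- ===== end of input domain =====

-- ===== PORT A =====
-- B changes only the algorithm (closed form vs loop); same return values on Pre_.
def numberOfBalls (arr : Option (List Int)) (n : Int) : Int :=
  match arr with
  | none => -1
  | some l =>
      -- for i in range(0, n): sum += (i+1) - arr[i]   (arr[i] raises outside Pre_)
      (PySem.List.pyRange 0 n 1).foldl (fun s i => s + ((i + 1) - PySem.List.pyGetD l i 0)) 0

-- ===== PORT B =====
def numberOfBalls_alt (arr : Option (List Int)) (n : Int) : Int :=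
  match arr with
  | none => -1
  | some l =>
      let m := max n 0
      PySem.Int.floordiv (m * (m + 1)) 2 - (PySem.List.slice l none (some m)).sum

-- ===== PRECONDITION & SPEC =====
-- Pre_ excludes arr = some l with n > len(l): there A raises IndexError at arr[i].
def Pre_numberOfBalls (arr : Option (List Int)) (n : Int) : Prop :=
  arr = none ∨ n ≤ ((arr.getD []).length : Int)
instance (arr : Option (List Int)) (n : Int) : Decidable (Pre_numberOfBalls arr n) := by
  unfold Pre_numberOfBalls; infer_instance
def pvWitness_numberOfBalls : Option (List Int) × Int := (some [3, 1, 4], 3)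

def Spec_numberOfBalls (arr : Option (List Int)) (n : Int) (out : Int) : Prop := out = numberOfBalls_alt arr n
instance (arr : Option (List Int)) (n : Int) (out : Int) : Decidable (Spec_numberOfBalls arr n out) := by unfold Spec_numberOfBalls; infer_instance

-- ===== CLAIM (what is proved, stated in full; the proofs are below) =====
def Claim_equal_numberOfBalls : Prop := ∀ (arr : Option (List Int)) (n : Int), Dom_numberOfBalls arr n → Pre_numberOfBalls arr n → Spec_numberOfBalls arr n (numberOfBalls arr n)

-- ===== LEMMAS AND PROOFS =====

-- A's loop up to a natural bound k ≤ len(l) equals triangular(k) minus the sum of the first k elements.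
lemma numberOfBalls_key (l : List Int) (k : Nat) (h : k ≤ l.length) :
    (PySem.List.pyRange 0 (k : Int) 1).foldl (fun s i => s + ((i + 1) - PySem.List.pyGetD l i 0)) 0
      = ((k * (k + 1) / 2 : Nat) : Int) - (l.take k).sum := by
  induction k with
  | zero => simp [PySem.List.pyRange_one_eq_nil]
  | succ k ih =>
      have hk : k ≤ l.length := Nat.le_of_succ_le h
      have hr : PySem.List.pyRange 0 ((k : Int) + 1) 1
          = PySem.List.pyRange 0 (k : Int) 1 ++ [(k : Int)] :=
        PySem.List.pyRange_one_succ_right (by exact_mod_cast Nat.zero_le k)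
      have hget : PySem.List.pyGetD l (k : Int) 0 = l[k]'(by omega) :=
        PySem.List.pyGetD_ofNat l k 0 (by omega)
      have htake : l.take (k + 1) = l.take k ++ [l[k]'(by omega)] := by
        rw [List.take_add_one]
        simp [List.getElem?_eq_getElem (by omega : k < l.length)]
      have htri : ((k + 1) * (k + 1 + 1) / 2 : Nat) = (k * (k + 1) / 2 : Nat) + (k + 1) := by
        have h1 : (k + 1) * (k + 1 + 1) = k * (k + 1) + 2 * (k + 1) := by ring
        omega
      have hcast : (((k + 1 : Nat)) : Int) = (k : Int) + 1 := by push_cast; ring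
      rw [hcast, hr, List.foldl_append]
      simp only [List.foldl_cons, List.foldl_nil]
      rw [ih hk, hget, htake, htri]
      generalize (k * (k + 1) / 2 : Nat) = T
      push_cast [List.sum_append]
      simp only [List.sum_cons, List.sum_nil]
      ring

-- ===== VERDICT (by name: the statement is the Claim_ definition above) =====
theorem numberOfBalls_spec : Claim_equal_numberOfBalls := by
  intro arr n _ hpre
  unfold Spec_numberOfBalls numberOfBalls numberOfBalls_alt
  cases arr with
  | none => rfl
  | some l =>
      simp only
      rcases hpre with h | h
      · exact absurd h (by simp)
      · simp only [Option.getD_some] at h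
        by_cases hn : n ≤ 0
        · have hm : max n 0 = 0 := by omega
          rw [PySem.List.pyRange_one_eq_nil hn, hm]
          simp [PySem.Int.floordiv]
          rfl
        · have hm : max n 0 = n := by omega
          obtain ⟨k, hk⟩ : ∃ k : Nat, n = (k : Int) := ⟨n.toNat, by omega⟩
          subst hk
          rw [hm, numberOfBalls_key l k (by exact_mod_cast h)]
          have : PySem.List.slice l none (some (k : Int)) = l.take k :=
            PySem.List.slice_to_natCast l k
          rw [this]
          have : PySem.Int.floordiv ((k : Int) * ((k : Int) + 1)) 2
              = ((k * (k + 1) / 2 : Nat) : Int) := by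
            have := PySem.Int.floordiv_natCast (k * (k + 1)) 2
            push_cast at this ⊢
            exact this
          rw [this]
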